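-- pv_equiv track=rewrite | github.com/TannerLarson/lol-champ-picker | non_gui_picker.py | get_different_values
-- ===== SOURCE A (Python) =====
-- def get_different_values(listA, listB):
--     diff = listA + listB
--     num_occurances = {}
--     for element in diff:
--         if element not in num_occurances:
--             num_occurances[element] = 1
--         else:
--             num_occurances[element] += 1
--     for key, value in num_occurances.items():
--         if value > 1:
--             while key in diff:
--                 diff.remove(key)
--     return diff
-- ===== SOURCE B (Python) =====
-- def get_different_values(listA, listB):
--     diff = listA + listB
--     return [x for x in diff if diff.count(x) == 1]
-- ===== Notes on version B (the rewrite author's own statement) =====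
-- stated objective: simpler
-- what changed: Replaced A's occurrence dictionary plus repeated while-in/remove deletion passes by a single comprehension that keeps an element iff it occurs exactly once in listA+listB, rescanning with list.count instead of a pre-built table.
import Mathlib
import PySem

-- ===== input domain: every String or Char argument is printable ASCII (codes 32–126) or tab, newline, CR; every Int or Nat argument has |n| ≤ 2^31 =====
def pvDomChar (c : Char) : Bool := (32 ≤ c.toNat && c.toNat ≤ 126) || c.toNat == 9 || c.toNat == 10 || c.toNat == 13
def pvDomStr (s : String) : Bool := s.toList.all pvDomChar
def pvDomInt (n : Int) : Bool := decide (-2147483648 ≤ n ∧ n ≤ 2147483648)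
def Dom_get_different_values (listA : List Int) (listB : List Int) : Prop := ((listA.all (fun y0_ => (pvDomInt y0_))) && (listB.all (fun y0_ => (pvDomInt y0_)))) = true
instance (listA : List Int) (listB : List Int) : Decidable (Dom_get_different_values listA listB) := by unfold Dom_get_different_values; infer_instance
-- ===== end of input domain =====

-- B replaces A's occurrence dictionary and repeated while/remove deletion passes by one
-- comprehension keeping the elements whose count in listA+listB is exactly 1 (simpler, same result).


-- ===== PORT A =====
-- 'while key in diff: diff.remove(key)' — repeatedly remove the first occurrence until none is left
def removeLoop (key : Int) (diff : List Int) : List Int :=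
  match h : PySem.List.remove? diff key with
  | none => diff
  | some d => removeLoop key d
termination_by diff.length
decreasing_by
  have hmem : key ∈ diff := by
    by_contra hk
    rw [(PySem.List.remove?_eq_none_iff diff key).mpr hk] at h
    simp at h
  rw [PySem.List.remove?_eq_some_erase diff key hmem] at h
  cases h
  have h1 := List.length_erase_of_mem hmem
  have h2 : 0 < diff.length := List.length_pos_of_mem hmem
  omega

def get_different_values (listA : List Int) (listB : List Int) : List Int :=
  let diff := listA ++ listB
  let num_occurances : PySem.Dict Int Int :=
    diff.foldl (fun d element =>
      if d.contains element = false then d.insert element 1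
      else d.modify element 0 (· + 1)) PySem.Dict.empty
  num_occurances.items.foldl (fun diff kv =>
    if kv.2 > 1 then removeLoop kv.1 diff else diff) diff

-- ===== PORT B =====
def get_different_values_alt (listA : List Int) (listB : List Int) : List Int :=
  let diff := listA ++ listB
  diff.filter (fun x => PySem.List.count diff x == 1)

-- ===== PRECONDITION & SPEC =====
def Spec_get_different_values (listA : List Int) (listB : List Int) (out : List Int) : Prop := out = get_different_values_alt listA listB
instance (listA : List Int) (listB : List Int) (out : List Int) : Decidable (Spec_get_different_values listA listB out) := by unfold Spec_get_different_values; infer_instance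

-- ===== CLAIM (what is proved, stated in full; the proofs are below) =====
def Claim_equal_get_different_values : Prop := ∀ (listA : List Int) (listB : List Int), Dom_get_different_values listA listB → Spec_get_different_values listA listB (get_different_values listA listB)

-- ===== LEMMAS AND PROOFS =====

-- A's counting loop builds exactly Counter(diff)
theorem dictA_eq_counter (l : List Int) :
    l.foldl (fun d element =>
      if d.contains element = false then d.insert element 1
      else d.modify element 0 (· + 1)) PySem.Dict.empty = PySem.Dict.counter l := by
  rw [PySem.Dict.counter_eq_foldl]
  apply PySem.List.foldl_congr_mem
  intro d x _
  by_cases hc : d.contains x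
  · simp [hc, PySem.Dict.modify]
  · simp only [Bool.not_eq_true] at hc
    simp [hc, PySem.Dict.modify, PySem.Dict.getD_of_not_contains _ _ hc]

-- removing a value on which the predicate is false commutes away under filter
theorem filter_erase_of_false {p : Int → Bool} {k : Int} (hk : p k = false) :
    ∀ l : List Int, l.filter p = (l.erase k).filter p := by
  intro l
  induction l with
  | nil => simp
  | cons x t ih =>
    by_cases hx : x = k
    · subst hx
      simp [List.erase_cons_head, hk]
    · rw [List.erase_cons_tail (by simpa using hx)]
      simp only [List.filter_cons, ih]

-- the while-loop removes every occurrence: it is a filter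
theorem removeLoop_eq_filter (k : Int) (l : List Int) :
    removeLoop k l = l.filter (fun x => x != k) := by
  induction hn : l.length using Nat.strong_induction_on generalizing l with
  | _ n ih =>
    rw [removeLoop.eq_def]
    split
    next h =>
      have hk := (PySem.List.remove?_eq_none_iff l k).mp h
      rw [List.filter_eq_self.mpr]
      intro x hx
      simp only [bne_iff_ne, ne_eq]
      exact fun he => hk (he ▸ hx)
    next d h =>
      have hmem : k ∈ l := by
        by_contra hk
        rw [(PySem.List.remove?_eq_none_iff l k).mpr hk] at h
        simp at h
      rw [PySem.List.remove?_eq_some_erase l k hmem] at h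
      injection h with h
      subst h
      have h1 := List.length_erase_of_mem hmem
      have h2 : 0 < l.length := List.length_pos_of_mem hmem
      rw [ih (l.erase k).length (by omega) (l.erase k) rfl,
        ← filter_erase_of_false (by simp)]

-- A's deletion loop over the dict items, as one filter
theorem foldl_removeLoop (its : List (Int × Int)) (l : List Int) :
    its.foldl (fun diff kv => if kv.2 > 1 then removeLoop kv.1 diff else diff) l
      = l.filter (fun x => its.all (fun kv => !(decide (kv.2 > 1)) || x != kv.1)) := by
  induction its generalizing l with
  | nil => simp
  | cons kv rest ih =>
    simp only [List.foldl_cons, List.all_cons]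
    by_cases hv : kv.2 > 1
    · rw [if_pos hv, removeLoop_eq_filter, ih, List.filter_filter]
      apply List.filter_congr
      intro x _
      simp only [hv, decide_true, Bool.not_true, Bool.false_or]
      exact Bool.and_comm _ _
    · rw [if_neg hv, ih]
      apply List.filter_congr
      intro x _
      simp [hv]

theorem get_different_values_eq (listA listB : List Int) :
    get_different_values listA listB = get_different_values_alt listA listB := by
  unfold get_different_values get_different_values_alt
  simp only [dictA_eq_counter, PySem.Dict.items_counter, foldl_removeLoop]
  apply List.filter_congr
  intro x hx
  have hpos : 0 < List.count x (listA ++ listB) := List.count_pos_iff.mpr hx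
  simp only [List.all_map]
  by_cases hc : List.count x (listA ++ listB) = 1
  · have hb : (PySem.List.count (listA ++ listB) x == 1) = true := by
      show (List.count x (listA ++ listB) == 1) = true
      exact beq_iff_eq.mpr hc
    rw [hb]
    apply List.all_eq_true.mpr
    intro k hk
    by_cases hkx : k = x
    · subst hkx
      simp only [Function.comp_apply, hc]
      norm_num
    · simp [Function.comp, bne_iff_ne, Ne.symm hkx]
  · have hb : (PySem.List.count (listA ++ listB) x == 1) = false := by
      show (List.count x (listA ++ listB) == 1) = false
      exact beq_eq_false_iff_ne.mpr hc
    rw [hb]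
    apply List.all_eq_false.mpr
    refine ⟨x, (PySem.Set.mem_ofList _ _).mpr hx, ?_⟩
    have h1 : (1 : Int) < (List.count x (listA ++ listB) : Int) := by
      have h2 : 1 < List.count x (listA ++ listB) := by omega
      exact_mod_cast h2
    simp only [Function.comp_apply, bne_self_eq_false, Bool.or_false, gt_iff_lt, h1,
      decide_true, Bool.not_true]
    simp

-- ===== VERDICT (by name: the statement is the Claim_ definition above) =====
theorem get_different_values_spec : Claim_equal_get_different_values := by
  intro listA listB _
  exact get_different_values_eq listA listB
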